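-- pv_equiv track=rewrite | github.com/s5unnyjjj/Algorithm | 02_Programmers/014_Lv2_디펜스게임.py | solution
-- ===== SOURCE A (Python) =====
-- import heapq
--
-- def solution(n, k, enemy):
--     answer = 0
--     heap = []
--     sum_enemy = 0
--
--     for en in enemy:
--         heapq.heappush(heap, -en)
--         sum_enemy += en
--         if sum_enemy > n:
--             if k == 0:
--                 break
--             sum_enemy += heapq.heappop(heap)
--             k -= 1
--         answer += 1
--
--     return answer
-- ===== SOURCE B (Python) =====
-- def solution(n, k, enemy):
--     # No heap and no collection of fought waves: mark defeated-by-shield waves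
--     # directly on the input with a boolean array; when the running total exceeds n,
--     # rescan the prefix for the largest unmarked wave, mark it, and refund it.
--     removed = [False] * len(enemy)
--     total = 0
--     for i in range(len(enemy)):
--         total += enemy[i]
--         if total > n:
--             if k == 0:
--                 return i
--             best = i
--             for j in range(i):
--                 if not removed[j] and enemy[j] > enemy[best]:
--                     best = j
--             removed[best] = True
--             total -= enemy[best]
--             k -= 1
--     return len(enemy)
-- ===== Notes on version B (the rewrite author's own statement) =====
-- stated objective: alternative
-- what changed: B drops A's heap entirely: it keeps a boolean 'removed' mark array over the original input and, on each overflow, rescans the prefix of the input for the largest unmarked wave (a nested-scan mark-and-refund algorithm instead of a heap-maintained running bag), returning the wave index by an early return instead of A's break-driven counter.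
import Mathlib
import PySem

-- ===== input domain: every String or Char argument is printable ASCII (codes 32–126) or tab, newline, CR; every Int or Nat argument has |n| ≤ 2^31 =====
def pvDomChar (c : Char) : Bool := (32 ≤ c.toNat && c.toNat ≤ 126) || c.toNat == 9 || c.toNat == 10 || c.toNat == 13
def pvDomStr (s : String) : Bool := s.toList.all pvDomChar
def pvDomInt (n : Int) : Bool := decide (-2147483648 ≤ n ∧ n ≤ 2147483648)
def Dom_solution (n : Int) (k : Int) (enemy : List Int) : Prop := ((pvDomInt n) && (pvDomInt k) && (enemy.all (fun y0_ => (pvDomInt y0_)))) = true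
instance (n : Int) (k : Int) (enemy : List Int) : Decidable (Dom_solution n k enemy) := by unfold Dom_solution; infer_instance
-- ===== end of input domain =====

-- B replaces A's heap-maintained bag of fought waves by a mark-and-refund pass:
-- a boolean 'removed' array over the original input, the largest unmarked wave of the
-- prefix found by a rescan at each overflow, early return instead of break+counter.
-- Same return value on every input ("alternative", not faster).

-- ===== PORT A =====
-- heapq is ported by its priority-queue contract: the heap list is the bag of pushed
-- elements; heappop returns and removes the minimum (heapq's internal array layout is
-- not observable through this function).
def solutionGo (n : Int) (rest : List Int) (heap : List Int) (sumEnemy : Int)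
    (k : Int) (answer : Int) : Int :=
  match rest with
  | [] => answer
  | en :: rest =>
    let heap1 := (-en) :: heap          -- heapq.heappush(heap, -en)
    let s1 := sumEnemy + en
    if s1 > n then
      if k = 0 then answer              -- break
      else
        match PySem.List.min? heap1 (fun x => x) with
        | none => answer                -- unreachable: heap1 is nonempty
        | some m => solutionGo n rest (heap1.erase m) (s1 + m) (k - 1) (answer + 1)
    else solutionGo n rest heap1 s1 k (answer + 1)

def solution (n : Int) (k : Int) (enemy : List Int) : Int :=
  solutionGo n enemy [] 0 k 0

-- ===== PORT B =====
-- Source B's inner scan 'for j in range(i): …' selecting the index of the largest unmarked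
-- wave, starting from best = i; all indices are in range, so the getD defaults are
-- never consulted.
def bestScan (enemy : List Int) (removed : List Bool) (i : Nat) : Nat :=
  (List.range i).foldl
    (fun best j =>
      if removed.getD j false = false && enemy.getD j 0 > enemy.getD best 0 then j
      else best) i

-- Source B's main 'for i in range(len(enemy))' loop with its two early returns
def solutionAltGo (n : Int) (enemy : List Int) (removed : List Bool)
    (total k : Int) (i : Nat) : Int :=
  if h : i < enemy.length then
    let total1 := total + enemy[i]
    if total1 > n then
      if k = 0 then (i : Int)
      else
        let best := bestScan enemy removed i
        solutionAltGo n enemy (removed.set best true)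
          (total1 - enemy.getD best 0) (k - 1) (i + 1)
    else solutionAltGo n enemy removed total1 k (i + 1)
  else (enemy.length : Int)
termination_by enemy.length - i

def solution_alt (n : Int) (k : Int) (enemy : List Int) : Int :=
  solutionAltGo n enemy (List.replicate enemy.length false) 0 k 0

-- ===== PRECONDITION & SPEC =====
def Spec_solution (n : Int) (k : Int) (enemy : List Int) (out : Int) : Prop := out = solution_alt n k enemy
instance (n : Int) (k : Int) (enemy : List Int) (out : Int) : Decidable (Spec_solution n k enemy out) := by unfold Spec_solution; infer_instance

-- ===== CLAIM (what is proved, stated in full; the proofs are below) =====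
def Claim_equal_solution : Prop := ∀ (n : Int) (k : Int) (enemy : List Int), Dom_solution n k enemy → Spec_solution n k enemy (solution n k enemy)

-- ===== LEMMAS AND PROOFS =====

-- the values of the unmarked waves of the prefix of length i, in input order
def live (enemy : List Int) (removed : List Bool) (i : Nat) : List Int :=
  (List.range i).filterMap
    (fun j => if removed.getD j false then none else some (enemy.getD j 0))

-- the inner scan returns an index whose value dominates the start index and every
-- unmarked scanned index, and which is itself the start index or unmarked
lemma scan_aux (enemy : List Int) (removed : List Bool) :
    ∀ (r : List Nat) (b : Nat),
      (r.foldl (fun best j =>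
          if removed.getD j false = false && enemy.getD j 0 > enemy.getD best 0 then j
          else best) b = b
        ∨ (r.foldl (fun best j =>
            if removed.getD j false = false && enemy.getD j 0 > enemy.getD best 0 then j
            else best) b ∈ r
          ∧ removed.getD (r.foldl (fun best j =>
              if removed.getD j false = false && enemy.getD j 0 > enemy.getD best 0 then j
              else best) b) false = false))
      ∧ enemy.getD b 0 ≤ enemy.getD (r.foldl (fun best j =>
          if removed.getD j false = false && enemy.getD j 0 > enemy.getD best 0 then j
          else best) b) 0
      ∧ ∀ j ∈ r, removed.getD j false = false →
          enemy.getD j 0 ≤ enemy.getD (r.foldl (fun best j =>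
            if removed.getD j false = false && enemy.getD j 0 > enemy.getD best 0 then j
            else best) b) 0 := by
  intro r
  induction r with
  | nil => intro b; refine ⟨Or.inl rfl, le_refl _, by simp⟩
  | cons a r ih =>
    intro b
    simp only [List.foldl_cons]
    by_cases hc : removed.getD a false = false && enemy.getD a 0 > enemy.getD b 0
    · rw [if_pos hc]
      obtain ⟨h1, h2, h3⟩ := ih a
      have hun : removed.getD a false = false := by
        rcases Bool.and_eq_true_iff.1 hc with ⟨hun, _⟩; simpa using hun
      have hgt' : enemy.getD b 0 < enemy.getD a 0 := by
        rcases Bool.and_eq_true_iff.1 hc with ⟨_, hgt⟩; simpa using hgt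
      refine ⟨?_, le_trans (le_of_lt hgt') h2, ?_⟩
      · rcases h1 with h1 | ⟨hm, hu⟩
        · exact Or.inr ⟨by rw [h1]; exact List.mem_cons_self, by rw [h1]; exact hun⟩
        · exact Or.inr ⟨List.mem_cons_of_mem a hm, hu⟩
      · intro j hj hju
        rcases List.mem_cons.1 hj with rfl | hj'
        · exact h2
        · exact h3 j hj' hju
    · rw [if_neg hc]
      obtain ⟨h1, h2, h3⟩ := ih b
      refine ⟨?_, h2, ?_⟩
      · rcases h1 with h1 | ⟨hm, hu⟩
        · exact Or.inl h1
        · exact Or.inr ⟨List.mem_cons_of_mem a hm, hu⟩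
      · intro j hj hju
        rcases List.mem_cons.1 hj with rfl | hj'
        · have hng : ¬ enemy.getD j 0 > enemy.getD b 0 := by
            intro hgt
            exact hc (by rw [hju]; simpa using hgt)
          exact le_trans (by omega) h2
        · exact h3 j hj' hju

-- instantiation at Source B's call: best is i or an unmarked smaller index, and its value
-- dominates the value at i and at every unmarked smaller index
lemma bestScan_spec (enemy : List Int) (removed : List Bool) (i : Nat) :
    (bestScan enemy removed i = i
      ∨ (bestScan enemy removed i < i ∧ removed.getD (bestScan enemy removed i) false = false))
    ∧ enemy.getD i 0 ≤ enemy.getD (bestScan enemy removed i) 0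
    ∧ ∀ j < i, removed.getD j false = false →
        enemy.getD j 0 ≤ enemy.getD (bestScan enemy removed i) 0 := by
  obtain ⟨h1, h2, h3⟩ := scan_aux enemy removed (List.range i) i
  refine ⟨?_, h2, ?_⟩
  · rcases h1 with h1 | ⟨hm, hu⟩
    · exact Or.inl h1
    · exact Or.inr ⟨List.mem_range.1 hm, hu⟩
  · intro j hj hju
    exact h3 j (List.mem_range.2 hj) hju

lemma live_succ (enemy : List Int) (removed : List Bool) (i : Nat)
    (hi : removed.getD i false = false) :
    live enemy removed (i + 1) = live enemy removed i ++ [enemy.getD i 0] := by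
  unfold live
  rw [List.range_succ, List.filterMap_append]
  congr 1
  simp only [List.filterMap_cons, List.filterMap_nil]
  rw [hi]
  simp

-- every element of live is a value at an unmarked index below i
lemma live_mem (enemy : List Int) (removed : List Bool) (i : Nat) (v : Int)
    (hv : v ∈ live enemy removed i) :
    ∃ j < i, removed.getD j false = false ∧ v = enemy.getD j 0 := by
  obtain ⟨j, hj, hfj⟩ := List.mem_filterMap.1 hv
  by_cases hu : removed.getD j false = true
  · rw [if_pos hu] at hfj
    exact absurd hfj (by simp)
  · rw [if_neg hu] at hfj
    exact ⟨j, List.mem_range.1 hj, by simpa using hu, (Option.some.inj hfj).symm⟩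

lemma live_mem_of (enemy : List Int) (removed : List Bool) (i j : Nat)
    (hj : j < i) (hu : removed.getD j false = false) :
    enemy.getD j 0 ∈ live enemy removed i := by
  refine List.mem_filterMap.2 ⟨j, List.mem_range.2 hj, ?_⟩
  rw [if_neg (by rw [hu]; simp)]

-- marking index i removes exactly the element it contributed at the end
lemma live_set_last (enemy : List Int) (removed : List Bool) (i : Nat)
    (hl : i < removed.length) :
    live enemy (removed.set i true) (i + 1) = live enemy removed i := by
  unfold live
  rw [List.range_succ, List.filterMap_append]
  have hset : (removed.set i true)[i]?.getD false = true := by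
    simp [hl]
  rw [List.filterMap_congr (g := fun j => if removed.getD j false then none
      else some (enemy.getD j 0))]
  · simp [List.getD_eq_getElem?_getD, hset]
  · intro j hj
    have hne : i ≠ j := by have := List.mem_range.1 hj; omega
    simp [List.getD_eq_getElem?_getD, List.getElem?_set_ne hne]

-- marking an unmarked index below i removes one copy of its value from live
lemma live_set_perm (enemy : List Int) (removed : List Bool) (i best : Nat)
    (hb : best < i) (hbl : best < removed.length)
    (hu : removed.getD best false = false) :
    (live enemy removed i).Perm
      (enemy.getD best 0 :: live enemy (removed.set best true) i) := by
  obtain ⟨r1, r2, hr⟩ := List.append_of_mem (List.mem_range.2 hb)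
  have hnd : (List.range i).Nodup := List.nodup_range
  rw [hr] at hnd
  have hb1 : best ∉ r1 := fun h =>
    (List.disjoint_of_nodup_append hnd) h List.mem_cons_self
  have hb2 : best ∉ r2 := (List.nodup_cons.1 (List.Nodup.of_append_right hnd)).1
  unfold live
  rw [hr, List.filterMap_append, List.filterMap_append, List.filterMap_cons,
      List.filterMap_cons]
  have hset : (removed.set best true)[best]?.getD false = true := by
    simp [hbl]
  have hcong : ∀ (r : List Nat), best ∉ r →
      r.filterMap (fun j => if (removed.set best true).getD j false then none
        else some (enemy.getD j 0))
      = r.filterMap (fun j => if removed.getD j false then none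
        else some (enemy.getD j 0)) := by
    intro r hnr
    refine List.filterMap_congr ?_
    intro j hj
    have hne : best ≠ j := fun h => hnr (h ▸ hj)
    simp [List.getD_eq_getElem?_getD, List.getElem?_set_ne hne]
  rw [hcong r1 hb1, hcong r2 hb2]
  have hfb : (if removed.getD best false then none else some (enemy.getD best 0))
      = some (enemy.getD best 0) := by rw [hu]; simp
  have hfb' : (if (removed.set best true).getD best false then none
      else some (enemy.getD best 0)) = none := by
    rw [List.getD_eq_getElem?_getD, hset]; simp
  rw [hfb, hfb']
  simpa using List.perm_middle

-- joint loop invariant: A's heap holds the negations of the unmarked prefix values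
-- (as a bag), every mark lies below i, and the two loops carry the same total, k and
-- wave count
lemma go_eq (n : Int) (enemy : List Int) :
    ∀ (d i : Nat) (removed : List Bool) (heap : List Int) (total k : Int),
      enemy.length - i ≤ d → i ≤ enemy.length →
      removed.length = enemy.length →
      (∀ j, removed.getD j false = true → j < i) →
      (heap.map (fun x => -x)).Perm (live enemy removed i) →
      solutionGo n (enemy.drop i) heap total k (i : Int)
        = solutionAltGo n enemy removed total k i := by
  intro d
  induction d with
  | zero =>
    intro i removed heap total k hd hi _ _ _
    have hie : i = enemy.length := by omega
    rw [solutionAltGo, dif_neg (by omega), hie, List.drop_length, solutionGo]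
  | succ d ih =>
    intro i removed heap total k hd hi hlen hmark hperm
    by_cases h : i < enemy.length
    · rw [List.drop_eq_getElem_cons h, solutionGo, solutionAltGo, dif_pos h]
      set e := enemy[i] with he
      have hgetD_i : enemy.getD i 0 = e := by
        simp [List.getD_eq_getElem?_getD, List.getElem?_eq_getElem h, he]
      have hu_i : removed.getD i false = false := by
        by_cases hb : removed.getD i false
        · exact absurd (hmark i hb) (by omega)
        · simpa using hb
      have hperm1 : (((-e) :: heap).map (fun x => -x)).Perm (e :: live enemy removed i) := by
        simpa using hperm.cons e
      by_cases hov : total + e > n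
      · simp only [if_pos hov]
        by_cases hk : k = 0
        · simp [hk]
        · simp only [if_neg hk]
          rw [PySem.List.min?_id_cons]
          set m := heap.foldl min (-e) with hm
          have hmin : PySem.List.min? ((-e) :: heap) (fun x => x) = some m := by
            rw [PySem.List.min?_id_cons]
          have hmem_m : m ∈ (-e) :: heap := PySem.List.min?_mem hmin
          have hlow : ∀ y ∈ (-e) :: heap, m ≤ y := fun y hy =>
            PySem.List.min?_isMin hmin y hy
          set best := bestScan enemy removed i with hbest
          set M := enemy.getD best 0 with hM
          obtain ⟨hB1, hB2, hB3⟩ := bestScan_spec enemy removed i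
          rw [← hbest] at hB1 hB2 hB3
          have hbl : best ≤ i := by rcases hB1 with h1 | ⟨h1, _⟩ <;> omega
          -- M is a maximum of the bag e :: live
          have hMmem : M ∈ e :: live enemy removed i := by
            rcases hB1 with h1 | ⟨h1, h2⟩
            · rw [hM, h1, hgetD_i]; exact List.mem_cons_self
            · exact List.mem_cons_of_mem e (live_mem_of enemy removed i best h1 h2)
          have hMmax : ∀ v ∈ e :: live enemy removed i, v ≤ M := by
            intro v hv
            rcases List.mem_cons.1 hv with rfl | hv'
            · rw [← hgetD_i]; exact hB2
            · obtain ⟨j, hj, hju, hjv⟩ := live_mem enemy removed i v hv'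
              exact hjv ▸ hB3 j hj hju
          -- the popped minimum is the negation of M
          have hmM : m = -M := by
            have h1 : -m ∈ e :: live enemy removed i :=
              hperm1.mem_iff.1 (List.mem_map_of_mem hmem_m)
            have h2 : -m ≤ M := hMmax _ h1
            have h3 : M ∈ (((-e) :: heap).map (fun x => -x)) := hperm1.symm.mem_iff.1 hMmem
            obtain ⟨x, hx, hxM⟩ := List.mem_map.1 h3
            have := hlow x hx
            omega
          -- bag invariant after the pop / the mark
          have htail : ((e :: live enemy removed i).erase M).Perm
              (live enemy (removed.set best true) (i + 1)) := by
            rcases hB1 with h1 | ⟨h1, h2⟩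
            · -- best = i : the popped value is the new wave itself
              have hMe : M = e := by rw [hM, h1, hgetD_i]
              rw [hMe, List.erase_cons_head, h1,
                live_set_last enemy removed i (by omega)]
            · -- best < i : one copy of M leaves the old live list
              have hp := live_set_perm enemy removed i best h1 (by omega) h2
              have hp2 : (e :: live enemy removed i).Perm
                  (M :: (live enemy (removed.set best true) i ++ [e])) := by
                refine (hp.cons e).trans ?_
                refine (List.Perm.swap _ _ _).trans ?_
                exact ((List.perm_append_singleton e _).symm.cons M)
              have hq := hp2.erase M
              rw [List.erase_cons_head] at hq
              refine hq.trans ?_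
              have hgi : (removed.set best true).getD i false = false := by
                have hne : best ≠ i := by omega
                rw [List.getD_eq_getElem?_getD, List.getElem?_set_ne hne,
                  ← List.getD_eq_getElem?_getD]
                exact hu_i
              rw [live_succ enemy (removed.set best true) i hgi, hgetD_i]
          have hperm2 : ((((-e) :: heap).erase m).map (fun x => -x)).Perm
              (live enemy (removed.set best true) (i + 1)) := by
            rw [List.map_erase (by intro a b hab; simpa using hab) ((-e) :: heap)]
            rw [show -m = M by omega]
            exact (hperm1.erase M).trans htail
          have hrec := ih (i + 1) (removed.set best true) (((-e) :: heap).erase m)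
            (total + e + m) (k - 1) (by omega) (by omega) (by simpa using hlen)
            (by
              intro j hj
              by_cases hjb : j = best
              · omega
              · have hne : best ≠ j := fun hx => hjb hx.symm
                have hj' : removed.getD j false = true := by
                  rw [List.getD_eq_getElem?_getD, ← List.getElem?_set_ne hne
                    (a := true), ← List.getD_eq_getElem?_getD]
                  exact hj
                have := hmark j hj'
                omega)
            hperm2
          have hcast : ((i : Int) + 1) = ((i + 1 : Nat) : Int) := by push_cast; ring
          rw [← hcast] at hrec
          show solutionGo n (List.drop (i + 1) enemy) (((-e) :: heap).erase m)
            (total + e + m) (k - 1) ((i : Int) + 1)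
            = solutionAltGo n enemy (removed.set best true) (total + e - M) (k - 1) (i + 1)
          rw [show total + e + m = total + e - M by omega] at hrec ⊢
          exact hrec
      · simp only [if_neg hov]
        have hperm3 : (((-e) :: heap).map (fun x => -x)).Perm
            (live enemy removed (i + 1)) := by
          rw [live_succ enemy removed i hu_i, hgetD_i]
          exact hperm1.trans (List.perm_append_singleton e _).symm
        have hrec := ih (i + 1) removed ((-e) :: heap) (total + e) k (by omega)
          (by omega) hlen (fun j hj => by have := hmark j hj; omega) hperm3
        have hcast : ((i : Int) + 1) = ((i + 1 : Nat) : Int) := by push_cast; ring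
        rw [← hcast] at hrec
        exact hrec
    · have hie : i = enemy.length := by omega
      rw [solutionAltGo, dif_neg (by omega), hie, List.drop_length, solutionGo]

-- ===== VERDICT (by name: the statement is the Claim_ definition above) =====
theorem solution_spec : Claim_equal_solution := by
  intro n k enemy _
  unfold Spec_solution solution solution_alt
  have := go_eq n enemy enemy.length 0 (List.replicate enemy.length false) [] 0 k
    (by omega) (by omega) (by simp)
    (by
      intro j hj
      by_cases hjl : j < enemy.length
      · simp [List.getD_eq_getElem?_getD, hjl] at hj
      · simp [List.getD_eq_getElem?_getD, List.getElem?_eq_none (by simpa using hjl :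
          (List.replicate enemy.length false).length ≤ j)] at hj)
    (by simp [live])
  simpa using this
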